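-- pv_equiv track=rewrite | github.com/DaedalusMASE/DaedalusMASE | daedalusmase_global_statistics/daedalusmase_global_statistics/utils.py | ConvertLeadingZerosToSpaces
-- ===== SOURCE A (Python) =====
-- def ConvertLeadingZerosToSpaces( str ):
--     """
--         Utility function. It takes a string containing numbers and places spaces instead of the leading zeros.
--
--         Args:
--                 str (string): a string containing numbers.
--         Returns:
--                 string: the string given as argument except that the leading zeros are replaced with space characters.
--     """
--     result = ""
--     leading_zone = True
--     for c in str:
--         if leading_zone:
--             if c == '0':
--                 result = result + ' '
--             else:
--                 result = result + c
--                 leading_zone = False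
--         else:
--             result = result + c
--     if result.strip().startswith('.')  and  result.startswith(' '): result = result[:result.rfind(' ')] + '0' + result.strip()
--     if result.strip() == "": result = result[ :-1 ] + '0'
--     if (result.startswith('.')) : result = '0' + result
--     return result
-- ===== SOURCE B (Python) =====
-- def ConvertLeadingZerosToSpaces(str):
--     n = len(str) - len(str.lstrip('0'))
--     return _fix(' ' * n + str[n:])
--
-- def _fix(r):
--     if r.strip().startswith('.') and r[:1] == ' ':
--         r = r[:r.rfind(' ')] + '0' + r.strip()
--     if not r.strip():
--         r = r[:-1] + '0'
--     if r[:1] == '.':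
--         r = '0' + r
--     return r
-- ===== Notes on version B (the rewrite author's own statement) =====
-- stated objective: simpler
-- what changed: Replaces the stateful char-by-char accumulation loop with a leading_zone flag by computing the length of the leading-zero prefix directly and building the result as that many spaces prepended to the remaining slice; the three post-processing repairs stay.
import Mathlib
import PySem

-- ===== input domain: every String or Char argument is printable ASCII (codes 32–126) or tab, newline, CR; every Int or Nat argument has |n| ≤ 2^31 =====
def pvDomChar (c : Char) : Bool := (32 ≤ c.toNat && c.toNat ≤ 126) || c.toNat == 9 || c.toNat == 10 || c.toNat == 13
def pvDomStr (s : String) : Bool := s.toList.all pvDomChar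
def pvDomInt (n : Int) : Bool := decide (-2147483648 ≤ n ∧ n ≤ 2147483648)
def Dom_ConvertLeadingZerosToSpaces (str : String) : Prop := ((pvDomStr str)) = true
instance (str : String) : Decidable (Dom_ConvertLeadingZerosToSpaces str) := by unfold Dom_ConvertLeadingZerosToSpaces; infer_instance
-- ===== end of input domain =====

-- B replaces A's stateful character loop (leading_zone flag, char-by-char append) by a
-- direct prefix-length computation (len - len(lstrip('0'))) plus padding and slicing;
-- objective: simpler. Total equivalence, no precondition.


-- ===== PORT A =====
-- the `for c in str` loop: state = (result so far, leading_zone flag)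
def pvLoopA : List Char → List Char → Bool → List Char
  | [], result, _ => result
  | c :: cs, result, leading =>
    if leading then
      if c = '0' then pvLoopA cs (result ++ [' ']) true
      else pvLoopA cs (result ++ [c]) false
    else pvLoopA cs (result ++ [c]) false

def ConvertLeadingZerosToSpaces (str : String) : String :=
  let r0 := pvLoopA str.toList [] true
  let r1 :=
    if PySem.Chars.startswith (PySem.Chars.strip r0) ['.'] && PySem.Chars.startswith r0 [' '] then
      PySem.List.slice r0 none (some (PySem.Chars.rfind r0 [' '])) ++ ['0'] ++ PySem.Chars.strip r0
    else r0
  let r2 := if PySem.Chars.strip r1 = [] then PySem.List.slice r1 none (some (-1)) ++ ['0'] else r1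
  let r3 := if PySem.Chars.startswith r2 ['.'] then ['0'] ++ r2 else r2
  String.ofList r3

-- ===== PORT B =====
-- helper _fix of Source B (the three post-processing repairs)
def pvFixB (r : List Char) : List Char :=
  let ra :=
    if PySem.Chars.startswith (PySem.Chars.strip r) ['.'] ∧ PySem.List.slice r none (some 1) = [' '] then
      PySem.List.slice r none (some (PySem.Chars.rfind r [' '])) ++ ['0'] ++ PySem.Chars.strip r
    else r
  let rb := if PySem.Chars.strip ra = [] then PySem.List.slice ra none (some (-1)) ++ ['0'] else ra
  if PySem.List.slice rb none (some 1) = ['.'] then ['0'] ++ rb else rb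

def ConvertLeadingZerosToSpaces_alt (str : String) : String :=
  -- str.lstrip('0') ported by hand as dropWhile (· = '0'): exact, since lstrip('0')
  -- removes exactly the maximal leading run of '0' characters
  let n := str.toList.length - (str.toList.dropWhile (· = '0')).length
  String.ofList (pvFixB (PySem.List.pyRepeat [' '] (n : Int) ++ PySem.List.slice str.toList (some (n : Int)) none))

-- ===== PRECONDITION & SPEC =====
def Spec_ConvertLeadingZerosToSpaces (str : String) (out : String) : Prop := out = ConvertLeadingZerosToSpaces_alt str
instance (str : String) (out : String) : Decidable (Spec_ConvertLeadingZerosToSpaces str out) := by unfold Spec_ConvertLeadingZerosToSpaces; infer_instance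

-- ===== CLAIM (what is proved, stated in full; the proofs are below) =====
def Claim_equal_ConvertLeadingZerosToSpaces : Prop := ∀ (str : String), Dom_ConvertLeadingZerosToSpaces str → Spec_ConvertLeadingZerosToSpaces str (ConvertLeadingZerosToSpaces str)

-- ===== LEMMAS AND PROOFS =====

-- once leading_zone is False the loop just appends the rest
theorem pvLoopA_false (cs : List Char) : ∀ acc, pvLoopA cs acc false = acc ++ cs := by
  induction cs with
  | nil => intro acc; simp [pvLoopA]
  | cons c cs ih => intro acc; simp [pvLoopA, ih]

-- the loop replaces the maximal leading run of '0' by spaces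
theorem pvLoopA_true (cs : List Char) : ∀ acc, pvLoopA cs acc true =
    acc ++ List.replicate (cs.takeWhile (· = '0')).length ' ' ++ cs.dropWhile (· = '0') := by
  induction cs with
  | nil => intro acc; simp [pvLoopA]
  | cons c cs ih =>
    intro acc
    by_cases h : c = '0'
    · subst h
      simp [pvLoopA, ih, List.replicate_succ]
    · simp [pvLoopA, h, pvLoopA_false]

theorem pvDropWhile_eq_drop (p : Char → Bool) (l : List Char) :
    l.dropWhile p = l.drop (l.takeWhile p).length := by
  induction l with
  | nil => simp
  | cons a l ih =>
    by_cases h : p a = true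
    · simp [h, ih]
    · simp [h]

theorem pvLen_eq (p : Char → Bool) (l : List Char) :
    l.length - (l.dropWhile p).length = (l.takeWhile p).length := by
  have h := congrArg List.length (List.takeWhile_append_dropWhile (p := p) (l := l))
  rw [List.length_append] at h
  omega

-- r[:1] = [c]  ↔  r starts with c
theorem pvSlice_one_eq (r : List Char) (c : Char) :
    (PySem.List.slice r none (some 1) = [c]) ↔ PySem.Chars.startswith r [c] = true := by
  rw [PySem.Chars.startswith_iff, PySem.List.slice_to r (by norm_num)]
  have h1 : (1 : Int).toNat = 1 := rfl
  rw [h1]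
  cases r with
  | nil => simp
  | cons a l => simp [List.take_succ_cons, List.cons_prefix_cons, eq_comm]

-- A's inline fixups compute pvFixB
theorem pvFix_agree (r : List Char) :
    (let r1 :=
      if PySem.Chars.startswith (PySem.Chars.strip r) ['.'] && PySem.Chars.startswith r [' '] then
        PySem.List.slice r none (some (PySem.Chars.rfind r [' '])) ++ ['0'] ++ PySem.Chars.strip r
      else r
     let r2 := if PySem.Chars.strip r1 = [] then PySem.List.slice r1 none (some (-1)) ++ ['0'] else r1
     if PySem.Chars.startswith r2 ['.'] then ['0'] ++ r2 else r2) = pvFixB r := by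
  unfold pvFixB
  have h1 : (PySem.Chars.startswith (PySem.Chars.strip r) ['.'] && PySem.Chars.startswith r [' '] = true)
      ↔ (PySem.Chars.startswith (PySem.Chars.strip r) ['.'] ∧ PySem.List.slice r none (some 1) = [' ']) := by
    simp [pvSlice_one_eq]
  simp only []
  split_ifs with hA hB <;>
    simp_all [pvSlice_one_eq]

-- the two "value" computations coincide
theorem pvValue_agree (l : List Char) :
    List.replicate (l.takeWhile (· = '0')).length ' ' ++ l.dropWhile (· = '0') =
    PySem.List.pyRepeat [' '] ((l.length - (l.dropWhile (· = '0')).length : Nat) : Int) ++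
      PySem.List.slice l (some ((l.length - (l.dropWhile (· = '0')).length : Nat) : Int)) none := by
  rw [pvLen_eq, PySem.List.pyRepeat_singleton,
    PySem.List.slice_from l (by exact_mod_cast Nat.zero_le _)]
  rw [Int.toNat_natCast, ← pvDropWhile_eq_drop]

-- ===== VERDICT (by name: the statement is the Claim_ definition above) =====
theorem ConvertLeadingZerosToSpaces_spec : Claim_equal_ConvertLeadingZerosToSpaces := by
  intro str _
  show ConvertLeadingZerosToSpaces str = ConvertLeadingZerosToSpaces_alt str
  dsimp only [ConvertLeadingZerosToSpaces, ConvertLeadingZerosToSpaces_alt]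
  rw [pvLoopA_true, List.nil_append, pvValue_agree]
  exact congrArg String.ofList (pvFix_agree _)
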